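-- pv_equiv track=rewrite | github.com/hongminpark/prgrms | stack_queue/lv2_다리를지나는트럭.py | solution
-- ===== SOURCE A (Python) =====
-- from collections import deque
--
-- def solution(bridge_length, weight, truck_weights):
--     time = 0
--     dq = deque([0] * bridge_length)
--     for truck in truck_weights:
--         while True:
--             dq.popleft()
--             time += 1
--             if truck <= weight - sum(dq):
--                 dq.append(truck)
--                 break
--             else:
--                 dq.append(0)
--     while len(dq):
--         dq.popleft()
--         time += 1
--
--     return time
-- ===== SOURCE B (Python) =====
-- from collections import deque
--
-- def solution(bridge_length, weight, truck_weights):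
--     time = 0
--     waiting = deque(truck_weights)
--     onbridge = deque()  # (exit_time, truck_weight) for trucks currently on the bridge
--     cur = 0             # total weight currently on the bridge
--     while waiting or onbridge:
--         time += 1
--         if onbridge and onbridge[0][0] <= time:  # front truck's exit is due
--             cur -= onbridge.popleft()[1]
--         if waiting and cur + waiting[0] <= weight:
--             t = waiting.popleft()
--             onbridge.append((time + bridge_length, t))
--             cur += t
--         elif waiting and not onbridge:
--             # no event pending and the next truck still does not fit: it never will
--             raise ValueError("truck can never enter the bridge")
--     return time
-- ===== Notes on version B (the rewrite author's own statement) =====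
-- stated objective: alternative
-- what changed: Replaces the fixed-length zero-padded deque (placeholder popleft/append plus a full sum(dq) every tick) with an event deque of (exit_time, weight) pairs for the trucks actually on the bridge and a running on-bridge weight, and raises ValueError when the next truck can never fit instead of looping forever.
-- intended difference: On an empty truck list with bridge_length >= 1, A returns bridge_length (the time to drain its zero placeholders) while B returns 0, the intended total time when no truck has to cross. — e.g. on solution(3, 5, []): A returns 3, B returns 0
import Mathlib
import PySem

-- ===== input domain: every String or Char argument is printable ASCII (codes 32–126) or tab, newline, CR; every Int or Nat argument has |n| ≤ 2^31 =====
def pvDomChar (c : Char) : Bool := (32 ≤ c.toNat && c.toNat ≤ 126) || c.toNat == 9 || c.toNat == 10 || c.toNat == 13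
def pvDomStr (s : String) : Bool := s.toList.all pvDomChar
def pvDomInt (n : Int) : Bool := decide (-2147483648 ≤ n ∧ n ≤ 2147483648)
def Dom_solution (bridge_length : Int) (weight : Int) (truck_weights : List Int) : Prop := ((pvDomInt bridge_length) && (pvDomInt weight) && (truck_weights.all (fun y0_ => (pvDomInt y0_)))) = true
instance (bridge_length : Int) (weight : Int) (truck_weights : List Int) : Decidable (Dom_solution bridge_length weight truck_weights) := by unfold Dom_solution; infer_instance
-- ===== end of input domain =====

-- B replaces A's zero-padded fixed-length deque simulation by an event deque of
-- (exit_time, weight) pairs plus a running on-bridge weight; on the empty truck list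
-- B returns 0 where A returns bridge_length (intended difference D_ below).


-- ===== PORT A =====
-- inner `while True` loop; the fuel (called with dq.length) is only a totality device:
-- under Pre_ the condition fires within dq.length iterations, so the 0-fuel case is never reached;
-- the [] case is where Python's popleft() raises IndexError (excluded by Pre_).
-- Python's sum(dq): a left fold (tail-recursive; proved equal to List.sum below)
def pySum (l : List Int) : Int := l.foldl (· + ·) 0

def aInner (W t : Int) : Nat → List Int → Int → (List Int × Int)
  | _, [], time => ([], time)
  | 0, dq, time => (dq, time)
  | f+1, _ :: rest, time =>
      if t ≤ W - pySum rest then (rest ++ [t], time + 1)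
      else aInner W t f (rest ++ [0]) (time + 1)

-- `for truck in truck_weights`
def aMain (W : Int) : List Int → List Int → Int → (List Int × Int)
  | [], dq, time => (dq, time)
  | t :: ts, dq, time =>
      let r := aInner W t dq.length dq time
      aMain W ts r.1 r.2

-- `while len(dq): dq.popleft(); time += 1`
def aDrain : List Int → Int → Int
  | [], time => time
  | _ :: rest, time => aDrain rest (time + 1)

def solution (bridge_length : Int) (weight : Int) (truck_weights : List Int) : Int :=
  let r := aMain weight truck_weights (List.replicate bridge_length.toNat 0) 0
  aDrain r.1 r.2

-- ===== PORT B =====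
-- the `if onbridge and onbridge[0][0] <= time:` pop of Source B (front exit due)
def bPop : List (Int × Int) → Int → Int → (List (Int × Int) × Int)
  | (e, w) :: rest, cur, time => if e ≤ time then (rest, cur - w) else ((e, w) :: rest, cur)
  | [], cur, _ => ([], cur)

-- the `while waiting or onbridge` loop of Source B; the fuel is only a totality device
-- (under Pre_ the loop ends within the fuel passed by solution_alt)
def bLoop (L W : Int) : Nat → List Int → List (Int × Int) → Int → Int → Int
  | _, [], [], _, time => time
  | 0, _, _, _, time => time
  | f+1, t :: ws, ob, cur, time =>
      let p := bPop ob cur (time + 1)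
      if p.2 + t ≤ W then bLoop L W f ws (p.1 ++ [(time + 1 + L, t)]) (p.2 + t) (time + 1)
      else if p.1 = [] then time + 1  -- Source B raises ValueError here; unreachable under Pre_
      else bLoop L W f (t :: ws) p.1 p.2 (time + 1)
  | f+1, [], ob, cur, time =>
      let p := bPop ob cur (time + 1)
      bLoop L W f [] p.1 p.2 (time + 1)

def solution_alt (bridge_length : Int) (weight : Int) (truck_weights : List Int) : Int :=
  bLoop bridge_length weight
    ((truck_weights.length + 1) * bridge_length.toNat + truck_weights.length + 1)
    truck_weights [] 0 0

-- ===== PRECONDITION & SPEC =====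
-- Pre_ excludes exactly the inputs on which Python A does not return: bridge_length < 1 with a
-- nonempty truck list (popleft of an empty deque raises IndexError) and any truck heavier than
-- weight (the `while True` loop never breaks).
def Pre_solution (bridge_length : Int) (weight : Int) (truck_weights : List Int) : Prop :=
  (truck_weights = [] ∨ 1 ≤ bridge_length) ∧ ∀ t ∈ truck_weights, t ≤ weight

instance (bridge_length : Int) (weight : Int) (truck_weights : List Int) : Decidable (Pre_solution bridge_length weight truck_weights) := by unfold Pre_solution; infer_instance

def pvWitness_solution : Int × Int × List Int := (2, 10, [7, 4, 5, 6])

-- On an empty truck list with bridge_length ≥ 1, A returns bridge_length (the time to drain its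
-- zero placeholders) while B returns 0, the intended total time when no truck has to cross.
def D_solution (bridge_length : Int) (weight : Int) (truck_weights : List Int) : Prop :=
  truck_weights = [] ∧ 1 ≤ bridge_length

instance (bridge_length : Int) (weight : Int) (truck_weights : List Int) : Decidable (D_solution bridge_length weight truck_weights) := by unfold D_solution; infer_instance

def Spec_solution (bridge_length : Int) (weight : Int) (truck_weights : List Int) (out : Int) : Prop := ¬ D_solution bridge_length weight truck_weights → out = solution_alt bridge_length weight truck_weights
instance (bridge_length : Int) (weight : Int) (truck_weights : List Int) (out : Int) : Decidable (Spec_solution bridge_length weight truck_weights out) := by unfold Spec_solution; infer_instance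

def pvDiffWitness_solution : Int × Int × List Int := (3, 5, [])
def pvDiffWitnessOut_solution : Int × Int := (3, 0)

-- ===== CLAIM (what is proved, stated in full; the proofs are below) =====
def Claim_unchanged_solution : Prop := ∀ (bridge_length : Int) (weight : Int) (truck_weights : List Int), Dom_solution bridge_length weight truck_weights → Pre_solution bridge_length weight truck_weights → Spec_solution bridge_length weight truck_weights (solution bridge_length weight truck_weights)
def Claim_changed_solution : Prop := Dom_solution (pvDiffWitness_solution.1) (pvDiffWitness_solution.2.1) (pvDiffWitness_solution.2.2) ∧ Pre_solution (pvDiffWitness_solution.1) (pvDiffWitness_solution.2.1) (pvDiffWitness_solution.2.2) ∧ D_solution (pvDiffWitness_solution.1) (pvDiffWitness_solution.2.1) (pvDiffWitness_solution.2.2) ∧ solution (pvDiffWitness_solution.1) (pvDiffWitness_solution.2.1) (pvDiffWitness_solution.2.2) = pvDiffWitnessOut_solution.1 ∧ solution_alt (pvDiffWitness_solution.1) (pvDiffWitness_solution.2.1) (pvDiffWitness_solution.2.2) = pvDiffWitnessOut_solution.2 ∧ pvDiffWitnessOut_solution.1 ≠ pvDiffWitnessOut_solution.2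
def Claim_exact_solution : Prop := ∀ (bridge_length : Int) (weight : Int) (truck_weights : List Int), Dom_solution bridge_length weight truck_weights → Pre_solution bridge_length weight truck_weights → D_solution bridge_length weight truck_weights → solution bridge_length weight truck_weights ≠ solution_alt bridge_length weight truck_weights

-- ===== LEMMAS AND PROOFS =====

-- the weight occupying bridge slot with exit time e (0 if no truck exits at e)
def wAt (ob : List (Int × Int)) (e : Int) : Int :=
  ((ob.find? (fun p => p.1 == e)).map Prod.snd).getD 0

-- the bridge deque contents determined by the event list: slots with exit times time+1 .. time+n
def slots (ob : List (Int × Int)) (time : Int) : Nat → List Int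
  | 0 => []
  | n+1 => wAt ob (time + 1) :: slots ob (time + 1) n

-- coupling invariant between A's deque (dq, time) and B's state (ob, cur, time)
def RelAB (dq : List Int) (ob : List (Int × Int)) (cur time : Int) : Prop :=
  dq = slots ob time dq.length ∧
  (∀ p ∈ ob, time < p.1 ∧ p.1 ≤ time + (dq.length : Int)) ∧
  List.Pairwise (fun p q : Int × Int => p.1 < q.1) ob ∧
  cur = dq.sum

theorem foldl_add_eq (l : List Int) : ∀ a : Int, l.foldl (· + ·) a = a + l.sum := by
  induction l with
  | nil => intro a; simp
  | cons x t ih => intro a; simp [List.foldl_cons, ih (a + x)]; ring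

theorem pySum_eq (l : List Int) : pySum l = l.sum := by
  simpa using foldl_add_eq l 0

theorem wAt_nil (e : Int) : wAt [] e = 0 := rfl

theorem wAt_cons_eq (p : Int × Int) (ob : List (Int × Int)) (e : Int) (h : p.1 = e) :
    wAt (p :: ob) e = p.2 := by
  simp [wAt, List.find?, h]

theorem wAt_cons_ne (p : Int × Int) (ob : List (Int × Int)) (e : Int) (h : p.1 ≠ e) :
    wAt (p :: ob) e = wAt ob e := by
  unfold wAt
  rw [List.find?_cons_of_neg (by simp [h])]

theorem wAt_eq_zero (ob : List (Int × Int)) (e : Int) (h : ∀ p ∈ ob, p.1 ≠ e) :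
    wAt ob e = 0 := by
  induction ob with
  | nil => rfl
  | cons p t ih =>
      rw [wAt_cons_ne p t e (h p (by simp))]
      exact ih (fun q hq => h q (by simp [hq]))

theorem wAt_append_left (ob : List (Int × Int)) (p : Int × Int) (e : Int) (h : p.1 ≠ e) :
    wAt (ob ++ [p]) e = wAt ob e := by
  induction ob with
  | nil => simp [wAt_nil, wAt_cons_ne p [] e h]
  | cons q t ih =>
      by_cases hq : q.1 = e
      · rw [List.cons_append, wAt_cons_eq q _ e hq, wAt_cons_eq q _ e hq]
      · rw [List.cons_append, wAt_cons_ne q _ e hq, wAt_cons_ne q _ e hq]; exact ih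

theorem wAt_append_right (ob : List (Int × Int)) (p : Int × Int) (e : Int)
    (h : ∀ q ∈ ob, q.1 ≠ e) : wAt (ob ++ [p]) e = wAt [p] e := by
  induction ob with
  | nil => rfl
  | cons q t ih =>
      rw [List.cons_append, wAt_cons_ne q _ e (h q (by simp))]
      exact ih (fun r hr => h r (by simp [hr]))

theorem slots_congr (ob ob' : List (Int × Int)) :
    ∀ (n : Nat) (τ : Int), (∀ e : Int, τ < e → e ≤ τ + (n : Int) → wAt ob e = wAt ob' e) →
    slots ob τ n = slots ob' τ n := by
  intro n
  induction n with
  | zero => intro τ _; rfl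
  | succ m ih =>
      intro τ h
      have h1 : wAt ob (τ + 1) = wAt ob' (τ + 1) := h (τ + 1) (by omega) (by push_cast; omega)
      simp only [slots, h1]
      rw [ih (τ + 1) (fun e he1 he2 => h e (by omega) (by push_cast at he2 ⊢; omega))]

theorem slots_succ_snoc (ob : List (Int × Int)) :
    ∀ (n : Nat) (τ : Int), slots ob τ (n + 1) = slots ob τ n ++ [wAt ob (τ + (n : Int) + 1)] := by
  intro n
  induction n with
  | zero => intro τ; simp [slots]
  | succ m ih =>
      intro τ
      rw [show slots ob τ (m + 1 + 1) = wAt ob (τ + 1) :: slots ob (τ + 1) (m + 1) from rfl,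
        ih (τ + 1),
        show slots ob τ (m + 1) = wAt ob (τ + 1) :: slots ob (τ + 1) m from rfl]
      simp only [List.cons_append]
      have harith : τ + 1 + (m : Int) + 1 = τ + ((m + 1 : Nat) : Int) + 1 := by push_cast; ring
      rw [harith]

theorem slots_nil_eq (n : Nat) : ∀ τ : Int, slots [] τ n = List.replicate n 0 := by
  induction n with
  | zero => intro τ; rfl
  | succ m ih => intro τ; simp [slots, wAt_nil, List.replicate, ih (τ + 1)]

theorem slots_snoc (p : Int × Int) (t : Int) :
    ∀ (n : Nat) (ob : List (Int × Int)) (τ : Int), p.1 = τ + (n : Int) + 1 → p.2 = t →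
    (∀ q ∈ ob, q.1 ≠ p.1) → slots (ob ++ [p]) τ (n + 1) = slots ob τ n ++ [t] := by
  intro n
  induction n with
  | zero =>
      intro ob τ hp hpt h
      simp only [slots]
      rw [wAt_append_right ob p (τ + 1) (fun q hq => by have := h q hq; push_cast at hp; omega)]
      rw [wAt_cons_eq p [] (τ + 1) (by push_cast at hp; omega)]
      simp [hpt]
  | succ m ih =>
      intro ob τ hp hpt h
      rw [show slots (ob ++ [p]) τ (m + 1 + 1)
            = wAt (ob ++ [p]) (τ + 1) :: slots (ob ++ [p]) (τ + 1) (m + 1) from rfl,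
        show slots ob τ (m + 1) = wAt ob (τ + 1) :: slots ob (τ + 1) m from rfl]
      rw [wAt_append_left ob p (τ + 1) (by push_cast at hp; omega)]
      rw [ih ob (τ + 1) (by push_cast at hp ⊢; omega) hpt h]
      simp

theorem aDrain_eq (dq : List Int) : ∀ time : Int, aDrain dq time = time + (dq.length : Int) := by
  induction dq with
  | nil => intro time; simp [aDrain]
  | cons d rest ih => intro time; simp [aDrain, ih (time + 1)]; push_cast; ring

theorem drop_append_zero_sum (l : List Int) : ∀ k : Nat, ((l ++ [0]).drop k).sum = (l.drop k).sum := by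
  induction l with
  | nil => intro k; cases k <;> simp
  | cons x t ih =>
      intro k
      cases k with
      | zero => simp
      | succ m => simpa using ih m

-- one tick of popping: from a RelAB state with nonempty deque, bPop re-establishes RelAB
theorem lemPop (d : Int) (rest : List Int) (ob : List (Int × Int)) (cur time : Int)
    (h : RelAB (d :: rest) ob cur time) :
    RelAB rest (bPop ob cur (time + 1)).1 (bPop ob cur (time + 1)).2 (time + 1) ∧
    (∀ p ∈ ob, p.1 ≠ time + 1 → p ∈ (bPop ob cur (time + 1)).1) := by
  obtain ⟨hs, hr, hpw, hc⟩ := h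
  simp only [List.length_cons] at hs
  simp only [slots] at hs
  have hd : d = wAt ob (time + 1) := (List.cons.injEq _ _ _ _).mp hs |>.1
  have hrest : rest = slots ob (time + 1) rest.length := (List.cons.injEq _ _ _ _).mp hs |>.2
  match hob : ob with
  | [] =>
      refine ⟨⟨?_, ?_, ?_, ?_⟩, ?_⟩
      · simpa [bPop] using hrest
      · simp [bPop]
      · simp [bPop]
      · have : d = 0 := by rw [hd]; rfl
        simp only [bPop]
        simp only [List.sum_cons] at hc
        omega
      · simp
  | (e, w) :: obt =>
      by_cases he : e = time + 1
      · -- front truck exits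
        have hbp : bPop ((e, w) :: obt) cur (time + 1) = (obt, cur - w) := by
          simp only [bPop]
          rw [if_pos (by omega)]
        have hdw : d = w := by
          rw [hd, wAt_cons_eq (e, w) obt (time + 1) he]
        refine ⟨⟨?_, ?_, ?_, ?_⟩, ?_⟩
        · rw [hbp]
          conv_lhs => rw [hrest]
          exact slots_congr _ _ rest.length (time + 1)
            (fun x hx1 _ => wAt_cons_ne (e, w) obt x (by simp; omega))
        · rw [hbp]
          intro p hp
          have h1 := hr p (by simp [hp])
          have h2 := (List.pairwise_cons.mp hpw).1 p hp
          simp only [List.length_cons] at h1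
          push_cast at h1 ⊢
          omega
        · rw [hbp]; exact (List.pairwise_cons.mp hpw).2
        · rw [hbp]
          simp only [List.sum_cons] at hc
          omega
        · rw [hbp]
          intro p hp hne
          rcases List.mem_cons.mp hp with h1 | h1
          · exact absurd (by rw [h1]; exact he) hne
          · exact h1
      · -- nothing exits
        have hge : time < e := (hr (e, w) (by simp)).1
        have hbp : bPop ((e, w) :: obt) cur (time + 1) = ((e, w) :: obt, cur) := by
          simp only [bPop]
          rw [if_neg (by omega)]
        have hge' : time + 1 < e := by omega
        have hd0 : d = 0 := by
          rw [hd]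
          exact wAt_eq_zero _ _ (by
            intro p hp
            rcases List.mem_cons.mp hp with h1 | h1
            · rw [h1]; simp; omega
            · have h2 := (List.pairwise_cons.mp hpw).1 p h1
              simp only [] at h2
              omega)
        refine ⟨⟨?_, ?_, ?_, ?_⟩, ?_⟩
        · rw [hbp]; exact hrest
        · rw [hbp]
          intro p hp
          have h1 := hr p hp
          have h2 : time + 1 < p.1 := by
            rcases List.mem_cons.mp hp with h3 | h3
            · rw [h3]; omega
            · have := (List.pairwise_cons.mp hpw).1 p h3
              omega
          simp only [List.length_cons] at h1
          push_cast at h1 ⊢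
          omega
        · rw [hbp]; exact hpw
        · rw [hbp]
          simp only [List.sum_cons] at hc
          omega
        · rw [hbp]; intro p hp _; exact hp

-- the drain phase: with no waiting trucks, B ticks exactly dq.length more times
theorem lemDrain (L W : Int) : ∀ (n fB : Nat) (dq : List Int) (ob : List (Int × Int)) (cur time : Int),
    RelAB dq ob cur time → dq.length = n → n ≤ fB →
    (dq ≠ [] → ∃ p ∈ ob, p.1 = time + (n : Int)) →
    bLoop L W fB [] ob cur time = time + (n : Int) := by
  intro n
  induction n with
  | zero =>
      intro fB dq ob cur time hrel hlen _ _
      have hdq : dq = [] := List.eq_nil_of_length_eq_zero hlen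
      subst hdq
      have hob : ob = [] := by
        rcases ob with _ | ⟨p, t⟩
        · rfl
        · have := hrel.2.1 p (by simp)
          simp at this
          omega
      subst hob
      cases fB <;> simp [bLoop]
  | succ m ih =>
      intro fB dq ob cur time hrel hlen hfB hocc
      have hdne : dq ≠ [] := by intro h; rw [h] at hlen; simp at hlen
      obtain ⟨d, rest, rfl⟩ := List.exists_cons_of_ne_nil hdne
      obtain ⟨p, hpmem, hpe⟩ := hocc (by simp)
      have hrl : rest.length = m := by simpa using hlen
      obtain ⟨fB0, rfl⟩ : ∃ k, fB = k + 1 := ⟨fB - 1, by omega⟩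
      have hob : ob ≠ [] := by rintro rfl; simp at hpmem
      obtain ⟨q, obt, rfl⟩ := List.exists_cons_of_ne_nil hob
      have hstep : bLoop L W (fB0 + 1) [] (q :: obt) cur time
          = bLoop L W fB0 [] (bPop (q :: obt) cur (time + 1)).1 (bPop (q :: obt) cur (time + 1)).2 (time + 1) := by
        simp [bLoop]
      rw [hstep]
      obtain ⟨hrel', hkeep⟩ := lemPop d rest (q :: obt) cur time hrel
      have := ih fB0 rest (bPop (q :: obt) cur (time + 1)).1 (bPop (q :: obt) cur (time + 1)).2
        (time + 1) hrel' hrl (by omega)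
        (fun hrne => by
          have hm : m ≠ 0 := fun h0 => hrne (List.eq_nil_of_length_eq_zero (h0 ▸ hrl))
          have hne : p.1 ≠ time + 1 := by push_cast at hpe; omega
          exact ⟨p, hkeep p hpmem hne, by push_cast at hpe ⊢; omega⟩)
      rw [this]
      push_cast
      ring
      
-- the loading phase for one truck: B ticks in lockstep with A's inner while loop
theorem lemLoad (L W t : Int) (ws : List Int) :
    ∀ (fA : Nat) (fB : Nat) (dq : List Int) (ob : List (Int × Int)) (cur time : Int),
    RelAB dq ob cur time → dq ≠ [] → (dq.length : Int) = L →
    (∃ k : Nat, k < fA ∧ t ≤ W - ((dq.drop (k + 1)).sum)) →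
    fA ≤ fB →
    ∃ (fB' : Nat) (ob' : List (Int × Int)) (cur' : Int),
      bLoop L W fB (t :: ws) ob cur time
        = bLoop L W fB' ws ob' cur' (aInner W t fA dq time).2 ∧
      fB - fA ≤ fB' ∧
      RelAB (aInner W t fA dq time).1 ob' cur' (aInner W t fA dq time).2 ∧
      (aInner W t fA dq time).1.length = dq.length ∧
      (∃ p ∈ ob', p.1 = (aInner W t fA dq time).2 + ((aInner W t fA dq time).1.length : Int)) := by
  intro fA
  induction fA with
  | zero =>
      intro fB dq ob cur time _ _ _ hfit _
      obtain ⟨k, hk, _⟩ := hfit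
      omega
  | succ fA0 ih =>
      intro fB dq ob cur time hrel hne hlenL hfit hfAB
      obtain ⟨d, rest, rfl⟩ := List.exists_cons_of_ne_nil hne
      obtain ⟨fB0, rfl⟩ : ∃ k, fB = k + 1 := ⟨fB - 1, by omega⟩
      obtain ⟨hrel', hkeep⟩ := lemPop d rest ob cur time hrel
      have hcur' : (bPop ob cur (time + 1)).2 = rest.sum := hrel'.2.2.2
      have hstep : bLoop L W (fB0 + 1) (t :: ws) ob cur time
          = if (bPop ob cur (time + 1)).2 + t ≤ W then
              bLoop L W fB0 ws ((bPop ob cur (time + 1)).1 ++ [(time + 1 + L, t)]) ((bPop ob cur (time + 1)).2 + t) (time + 1)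
            else if (bPop ob cur (time + 1)).1 = [] then time + 1
            else bLoop L W fB0 (t :: ws) (bPop ob cur (time + 1)).1 (bPop ob cur (time + 1)).2 (time + 1) := by
        simp [bLoop]
      by_cases hcond : t ≤ W - rest.sum
      · -- the truck fits: A loads it, B appends its (exit_time, weight) event
        have hA : aInner W t (fA0 + 1) (d :: rest) time = (rest ++ [t], time + 1) := by
          simp [aInner, pySum_eq, hcond]
        have hBc : (bPop ob cur (time + 1)).2 + t ≤ W := by omega
        refine ⟨fB0, (bPop ob cur (time + 1)).1 ++ [(time + 1 + L, t)], (bPop ob cur (time + 1)).2 + t, ?_, by omega, ?_, by simp [hA], ?_⟩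
        · rw [hstep, if_pos hBc, hA]
        · -- RelAB for the new state
          obtain ⟨hs', hr', hpw', hc'⟩ := hrel'
          have hLr : L = (rest.length : Int) + 1 := by
            simp only [List.length_cons] at hlenL; push_cast at hlenL; omega
          rw [hA]
          refine ⟨?_, ?_, ?_, ?_⟩
          · simp only [List.length_append, List.length_cons, List.length_nil]
            have := slots_snoc (time + 1 + L, t) t rest.length (bPop ob cur (time + 1)).1 (time + 1)
              (by simp; omega) rfl
              (by intro q hq; have := hr' q hq; simp; push_cast at this; omega)
            rw [this, ← hs']
          · intro p hp
            rcases List.mem_append.mp hp with h1 | h1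
            · have := hr' p h1
              simp only [List.length_append, List.length_cons, List.length_nil]
              push_cast at this ⊢
              omega
            · rw [List.mem_singleton] at h1
              subst h1
              simp only [List.length_append, List.length_cons, List.length_nil]
              push_cast
              omega
          · rw [List.pairwise_append]
            refine ⟨hpw', by simp, ?_⟩
            intro p hp q hq
            simp at hq
            have := hr' p hp
            rw [hq]
            push_cast at this ⊢
            omega
          · simp only [List.sum_append, List.sum_cons, List.sum_nil]
            omega
        · exact ⟨(time + 1 + L, t), by simp, by simp [hA]; push_cast at hlenL ⊢; simp at hlenL; omega⟩
      · -- the truck does not fit yet: both sides tick once with no load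
        have hA : aInner W t (fA0 + 1) (d :: rest) time = aInner W t fA0 (rest ++ [0]) (time + 1) := by
          simp [aInner, pySum_eq, hcond]
        have hBc : ¬ ((bPop ob cur (time + 1)).2 + t ≤ W) := by omega
        -- the bridge cannot be empty of events here: that would make rest all zeros and the truck fit
        obtain ⟨hs', hr', hpw', hc'⟩ := hrel'
        have hob1 : (bPop ob cur (time + 1)).1 ≠ [] := by
          intro hnil
          have h0 : rest = List.replicate rest.length (0 : Int) := by
            rw [hnil] at hs'
            conv_lhs => rw [hs', slots_nil_eq]
          have hsum0 : rest.sum = 0 := by rw [h0]; simp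
          obtain ⟨k, hk, hks⟩ := hfit
          have hdz : ((d :: rest).drop (k + 1)).sum = 0 := by
            simp only [List.drop_succ_cons]
            conv_lhs => rw [h0]
            rw [List.drop_replicate]
            simp
          rw [hdz] at hks
          omega
        -- RelAB for (rest ++ [0])
        have hrel'' : RelAB (rest ++ [0]) (bPop ob cur (time + 1)).1 (bPop ob cur (time + 1)).2 (time + 1) := by
          refine ⟨?_, ?_, ?_, ?_⟩
          · simp only [List.length_append, List.length_cons, List.length_nil]
            rw [slots_succ_snoc _ rest.length (time + 1)]
            rw [wAt_eq_zero _ _ (by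
              intro p hp; have := hr' p hp; push_cast at this ⊢; omega)]
            rw [← hs']
          · intro p hp
            have := hr' p hp
            simp only [List.length_append, List.length_cons, List.length_nil]
            push_cast at this ⊢
            omega
          · exact hpw'
          · simp only [List.sum_append, List.sum_cons, List.sum_nil]
            omega
        obtain ⟨k, hk, hks⟩ := hfit
        have hk1 : k ≠ 0 := by
          intro h0; rw [h0] at hks; simp at hks; exact hcond hks
        have hfit' : ∃ k' : Nat, k' < fA0 ∧ t ≤ W - (((rest ++ [0]).drop (k' + 1)).sum) := by
          refine ⟨k - 1, by omega, ?_⟩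
          have h1 : (k - 1) + 1 = k := by omega
          rw [h1, drop_append_zero_sum rest k]
          have h2 : (d :: rest).drop (k + 1) = rest.drop k := by simp
          rw [h2] at hks
          exact hks
        obtain ⟨fB', ob', cur', heq, hfuel, hrelf, hlenf, hoccf⟩ :=
          ih fB0 (rest ++ [0]) (bPop ob cur (time + 1)).1 (bPop ob cur (time + 1)).2 (time + 1)
            hrel'' (by simp) (by simpa using hlenL) hfit' (by omega)
        refine ⟨fB', ob', cur', ?_, by omega, ?_, ?_, ?_⟩
        · rw [hstep, if_neg hBc, if_neg hob1, heq, hA]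
        · rw [hA]; exact hrelf
        · rw [hA]; rw [hlenf]; simp
        · rw [hA]; exact hoccf

-- the main loop: from any related state, B's remaining run equals A's remaining run + drain
theorem lemMain (W L : Int) : ∀ (ts : List Int) (fB : Nat) (dq : List Int) (ob : List (Int × Int)) (cur time : Int),
    RelAB dq ob cur time → (dq.length : Int) = L → 1 ≤ dq.length →
    (∀ x ∈ ts, x ≤ W) →
    (ts = [] → ∃ p ∈ ob, p.1 = time + (dq.length : Int)) →
    (ts.length + 1) * dq.length ≤ fB →
    bLoop L W fB ts ob cur time = aDrain (aMain W ts dq time).1 (aMain W ts dq time).2 := by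
  intro ts
  induction ts with
  | nil =>
      intro fB dq ob cur time hrel hlenL hlen1 _ hocc hfuel
      simp only [aMain]
      rw [aDrain_eq]
      exact lemDrain L W dq.length fB dq ob cur time hrel rfl (by simpa using hfuel)
        (fun _ => hocc rfl)
  | cons t ts' ih =>
      intro fB dq ob cur time hrel hlenL hlen1 hW hocc hfuel
      have hne : dq ≠ [] := by intro h; rw [h] at hlen1; simp at hlen1
      have hfit : ∃ k : Nat, k < dq.length ∧ t ≤ W - ((dq.drop (k + 1)).sum) := by
        refine ⟨dq.length - 1, by omega, ?_⟩
        have : dq.length - 1 + 1 = dq.length := by omega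
        rw [this, List.drop_length]
        simpa using hW t (by simp)
      obtain ⟨fB', ob', cur', heq, hfuel', hrelf, hlenf, hoccf⟩ :=
        lemLoad L W t ts' dq.length fB dq ob cur time hrel hne hlenL hfit
          (by nlinarith [dq.length.zero_le, ts'.length.zero_le])
      rw [heq]
      simp only [aMain]
      have := ih fB' (aInner W t dq.length dq time).1 ob' cur' (aInner W t dq.length dq time).2
        hrelf (by rw [hlenf]; exact hlenL) (by omega)
        (fun x hx => hW x (by simp [hx]))
        (fun _ => hoccf)
        (by rw [hlenf]; have h1 : (ts'.length + 1 + 1) * dq.length ≤ fB := by simpa using hfuel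
            have h2 : (ts'.length + 1) * dq.length + dq.length ≤ fB := by nlinarith
            omega)
      exact this

theorem solution_eq_alt (b w : Int) (ts : List Int) (hb : 1 ≤ b) (hts : ts ≠ [])
    (hW : ∀ x ∈ ts, x ≤ w) : solution b w ts = solution_alt b w ts := by
  have hrel : RelAB (List.replicate b.toNat (0 : Int)) [] 0 0 := by
    refine ⟨?_, by simp, by simp, by simp⟩
    rw [slots_nil_eq, List.length_replicate]
  have hlen1 : 1 ≤ (List.replicate b.toNat (0 : Int)).length := by
    simp [List.length_replicate]; omega
  have hlenL : ((List.replicate b.toNat (0 : Int)).length : Int) = b := by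
    simp [List.length_replicate]; omega
  have := lemMain w b ts ((ts.length + 1) * b.toNat + ts.length + 1)
    (List.replicate b.toNat (0 : Int)) [] 0 0
    hrel hlenL hlen1 hW (fun h => absurd h hts)
    (by rw [List.length_replicate]; omega)
  unfold solution solution_alt
  rw [this]

-- ===== VERDICT (by name: the statement is the Claim_ definition above) =====
theorem solution_spec : Claim_unchanged_solution := by
  intro b w ts _ hpre hD
  rcases hpre with ⟨hb, hW⟩
  rcases hb with hts | hb
  · -- ts = [] and (by ¬D_) b ≤ 0: both sides are 0
    subst hts
    have hb0 : ¬ (1 ≤ b) := fun h => hD ⟨rfl, h⟩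
    have : b.toNat = 0 := by omega
    unfold solution solution_alt
    rw [this]
    simp [aMain, aDrain, bLoop]
  · by_cases hts : ts = []
    · exact absurd ⟨hts, hb⟩ hD
    · exact solution_eq_alt b w ts hb hts hW
  
theorem solution_changed : Claim_changed_solution := by
  unfold Claim_changed_solution; decide

theorem solution_tight : Claim_exact_solution := by
  intro b w ts _ _ hD
  obtain ⟨hts, hb⟩ := hD
  subst hts
  unfold solution solution_alt
  simp only [aMain]
  rw [aDrain_eq, List.length_replicate]
  have h1 : bLoop b w ((([] : List Int).length + 1) * b.toNat + ([] : List Int).length + 1) [] [] 0 0 = 0 := by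
    simp [bLoop]
  rw [h1]
  omega
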